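-- pv_equiv track=rewrite | github.com/GuutLemon/CyberSecStudy | Python/Advent_of_codes/2015/day5.py | nice_string_check1
-- ===== SOURCE A (Python) =====
-- def nice_string_check1(string):
--     vowels = ['a', 'e', 'i', 'o', 'u']
--     vowels_check = []
--     dup = False
--     vow = False
--     # Check bad strings
--     bad_str = ['ab', 'cd', 'pq', 'xy']
--     for bad in bad_str:
--         if bad in ''.join(string):
--             return None
--     # Check vowels
--     for letter in string:
--         if letter in vowels:
--             vowels_check.append(letter)
--     if len(vowels_check) >= 3:
--         vow = True
--     # Check duplicate letters
--     for i in range(len(string) - 1):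
--         if string[i] == string[i + 1]:
--             dup = True
--             break
--     if dup and vow:
--         return string
-- ===== SOURCE B (Python) =====
-- def nice_string_check1(string):
--     vowel_count = 0
--     dup = False
--     bad = False
--     prev = None
--     for ch in string:
--         if ch in 'aeiou':
--             vowel_count += 1
--         if prev is not None:
--             if prev == ch:
--                 dup = True
--             if prev + ch in ('ab', 'cd', 'pq', 'xy'):
--                 bad = True
--         prev = ch
--     if bad:
--         return None
--     if dup and vowel_count >= 3:
--         return string
--     return None
-- ===== Notes on version B (the rewrite author's own statement) =====
-- stated objective: alternative
-- what changed: B replaces A's four substring scans plus two further passes (vowel-collecting list and index loop for duplicates) by a single pass over the characters that keeps a vowel counter, a duplicate flag and a bad-pair flag, comparing each character with the previous one.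
import Mathlib
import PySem

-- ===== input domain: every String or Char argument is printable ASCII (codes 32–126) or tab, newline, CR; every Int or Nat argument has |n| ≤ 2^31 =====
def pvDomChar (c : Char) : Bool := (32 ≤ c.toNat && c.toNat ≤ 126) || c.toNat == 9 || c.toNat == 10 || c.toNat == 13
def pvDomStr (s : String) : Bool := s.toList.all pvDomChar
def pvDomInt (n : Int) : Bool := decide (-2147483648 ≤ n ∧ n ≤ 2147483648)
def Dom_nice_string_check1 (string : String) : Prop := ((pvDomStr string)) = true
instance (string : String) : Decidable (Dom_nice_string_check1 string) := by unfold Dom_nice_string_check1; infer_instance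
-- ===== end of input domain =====

-- B replaces A's four substring scans plus two further passes by a single pass with a vowel
-- counter and dup/bad flags (objective: alternative single-pass decomposition, same cost).

-- ===== PORT A =====
-- for i in range(len(string) - 1): if string[i] == string[i + 1]: dup = True; break
def pvDupLoopA (cs : List Char) (i : Nat) : Bool :=
  if h : i + 1 < cs.length then
    if cs[i] == cs[i + 1] then true else pvDupLoopA cs (i + 1)
  else false
termination_by cs.length - i

def nice_string_check1 (string : String) : Option String :=
  let vowels : List Char := ['a', 'e', 'i', 'o', 'u']
  let bad_str : List String := ["ab", "cd", "pq", "xy"]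
  match bad_str.find? (fun bad => PySem.Str.isIn bad string) with
  | some _ => none
  | none =>
      let vowels_check :=
        string.toList.foldl (fun acc letter => if letter ∈ vowels then acc ++ [letter] else acc) []
      let vow : Bool := decide (3 ≤ vowels_check.length)
      let dup : Bool := pvDupLoopA string.toList 0
      if dup && vow then some string else none

-- ===== PORT B =====
-- loop state: (vowel_count, dup, bad, prev)
def pvStepB (st : Nat × Bool × Bool × Option Char) (ch : Char) : Nat × Bool × Bool × Option Char :=
  let v := if ch ∈ (['a', 'e', 'i', 'o', 'u'] : List Char) then st.1 + 1 else st.1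
  match st.2.2.2 with
  | none => (v, st.2.1, st.2.2.1, some ch)
  | some p =>
      (v, st.2.1 || (p == ch),
          st.2.2.1 || [['a','b'], ['c','d'], ['p','q'], ['x','y']].contains [p, ch], some ch)

def nice_string_check1_alt (string : String) : Option String :=
  let st := string.toList.foldl pvStepB (0, false, false, none)
  if st.2.2.1 then none
  else if st.2.1 && decide (3 ≤ st.1) then some string else none

-- ===== PRECONDITION & SPEC =====
def Spec_nice_string_check1 (string : String) (out : Option String) : Prop := out = nice_string_check1_alt string
instance (string : String) (out : Option String) : Decidable (Spec_nice_string_check1 string out) := by unfold Spec_nice_string_check1; infer_instance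

-- ===== CLAIM (what is proved, stated in full; the proofs are below) =====
def Claim_equal_nice_string_check1 : Prop := ∀ (string : String), Dom_nice_string_check1 string → Spec_nice_string_check1 string (nice_string_check1 string)

-- ===== LEMMAS AND PROOFS =====

-- generic scan over consecutive pairs, seeded with the previous character
def pvPairScan (f : Char → Char → Bool) (p : Char) : List Char → Bool
  | [] => false
  | c :: rest => f p c || pvPairScan f c rest

def pvEqF (p c : Char) : Bool := p == c
def pvBadF (p c : Char) : Bool := [['a','b'], ['c','d'], ['p','q'], ['x','y']].contains [p, c]
def pvIsVowel (c : Char) : Bool := decide (c ∈ (['a', 'e', 'i', 'o', 'u'] : List Char))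

def pvLastCh (p : Char) : List Char → Option Char
  | [] => some p
  | c :: rest => pvLastCh c rest

lemma pvFoldB_inv (cs : List Char) (v : Nat) (dup bad : Bool) (p : Char) :
    cs.foldl pvStepB (v, dup, bad, some p) =
      (v + cs.countP pvIsVowel, dup || pvPairScan pvEqF p cs,
        bad || pvPairScan pvBadF p cs, pvLastCh p cs) := by
  induction cs generalizing v dup bad p with
  | nil => simp [pvPairScan, pvLastCh]
  | cons c rest ih =>
      simp only [List.foldl_cons, pvStepB, pvPairScan, pvLastCh, ih]
      by_cases hv : c ∈ (['a', 'e', 'i', 'o', 'u'] : List Char) <;>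
        simp [pvIsVowel, pvEqF, pvBadF, hv, Bool.or_assoc]; omega

lemma pvPairScan_any (f : Char → Char → Bool) (p : Char) (cs : List Char) :
    pvPairScan f p cs = ((p :: cs).zip cs).any (fun q => f q.1 q.2) := by
  induction cs generalizing p with
  | nil => simp [pvPairScan]
  | cons c rest ih => simp [pvPairScan, ih]

lemma pvInfix_pair_iff (a b : Char) (cs : List Char) :
    [a, b] <:+: cs ↔ (a, b) ∈ cs.zip cs.tail := by
  induction cs with
  | nil => simp
  | cons c rest ih =>
      rw [List.infix_cons_iff]
      cases rest with
      | nil =>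
          simp only [List.tail_cons, List.zip_nil_right, List.not_mem_nil, iff_false]
          rintro (⟨t, ht⟩ | h)
          · simp at ht
          · simp at h
      | cons d r =>
          simp only [List.tail_cons] at ih ⊢
          rw [List.zip_cons_cons, List.mem_cons, ← ih]
          constructor
          · rintro (⟨t, ht⟩ | h)
            · injection ht with ha ht; injection ht with hb ht
              left; rw [ha, hb]
            · right; exact h
          · rintro (h | h)
            · injection h with ha hb
              subst ha; subst hb
              exact Or.inl ⟨r, rfl⟩
            · right; exact h

def pvAdjScan : List Char → Bool
  | x :: y :: r => (x == y) || pvAdjScan (y :: r)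
  | _ => false

lemma pvAdjScan_short (cs : List Char) (h : cs.length ≤ 1) : pvAdjScan cs = false := by
  match cs with
  | [] => rfl
  | [x] => rfl
  | x :: y :: r => simp at h

lemma pvDupLoopA_eq_adjScan (cs : List Char) : ∀ n i, cs.length - i ≤ n → pvDupLoopA cs i = pvAdjScan (cs.drop i) := by
  intro n
  induction n with
  | zero =>
      intro i hi
      rw [pvDupLoopA]
      have hlen : cs.length ≤ i := by omega
      rw [dif_neg (by omega)]
      rw [pvAdjScan_short _ (by simp; omega)]
  | succ n ih =>
      intro i hi
      rw [pvDupLoopA]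
      split
      · rename_i h
        have h1 : i < cs.length := by omega
        have hd : cs.drop i = cs[i] :: cs[i + 1] :: cs.drop (i + 2) := by
          rw [List.drop_eq_getElem_cons h1, List.drop_eq_getElem_cons h]
        rw [hd]
        have hd1 : cs.drop (i + 1) = cs[i + 1] :: cs.drop (i + 2) := List.drop_eq_getElem_cons h
        rw [show pvAdjScan (cs[i] :: cs[i+1] :: cs.drop (i+2)) =
              ((cs[i] == cs[i+1]) || pvAdjScan (cs[i+1] :: cs.drop (i+2))) from rfl, ← hd1,
            ← ih (i + 1) (by omega)]
        by_cases he : cs[i] == cs[i + 1] <;> simp [he]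
      · rename_i h
        rw [pvAdjScan_short _ (by simp; omega)]

lemma pvAdjScan_cons (c : Char) (rest : List Char) : pvAdjScan (c :: rest) = pvPairScan pvEqF c rest := by
  induction rest generalizing c with
  | nil => rfl
  | cons d r ih => simp [pvAdjScan, pvPairScan, pvEqF, ih]

lemma pvBad_eq (s : String) (c : Char) (rest : List Char) (h : s.toList = c :: rest) :
    ((["ab", "cd", "pq", "xy"] : List String).find? (fun bad => PySem.Str.isIn bad s)).isSome
      = pvPairScan pvBadF c rest := by
  have hab : PySem.Str.isIn "ab" s = true ↔ ('a', 'b') ∈ (c :: rest).zip rest := by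
    rw [PySem.Str.isIn_iff_infix, h]; simpa using pvInfix_pair_iff 'a' 'b' (c :: rest)
  have hcd : PySem.Str.isIn "cd" s = true ↔ ('c', 'd') ∈ (c :: rest).zip rest := by
    rw [PySem.Str.isIn_iff_infix, h]; simpa using pvInfix_pair_iff 'c' 'd' (c :: rest)
  have hpq : PySem.Str.isIn "pq" s = true ↔ ('p', 'q') ∈ (c :: rest).zip rest := by
    rw [PySem.Str.isIn_iff_infix, h]; simpa using pvInfix_pair_iff 'p' 'q' (c :: rest)
  have hxy : PySem.Str.isIn "xy" s = true ↔ ('x', 'y') ∈ (c :: rest).zip rest := by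
    rw [PySem.Str.isIn_iff_infix, h]; simpa using pvInfix_pair_iff 'x' 'y' (c :: rest)
  rw [Bool.eq_iff_iff, pvPairScan_any, List.any_eq_true, Option.isSome_iff_exists]
  constructor
  · rintro ⟨bad, hbad⟩
    have hmem := List.mem_of_find?_eq_some hbad
    have hp := List.find?_some hbad
    simp only [List.mem_cons, List.not_mem_nil, or_false] at hmem
    rcases hmem with rfl | rfl | rfl | rfl
    · exact ⟨('a', 'b'), hab.mp hp, by decide⟩
    · exact ⟨('c', 'd'), hcd.mp hp, by decide⟩
    · exact ⟨('p', 'q'), hpq.mp hp, by decide⟩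
    · exact ⟨('x', 'y'), hxy.mp hp, by decide⟩
  · rintro ⟨⟨x, y⟩, hmem, hbf⟩
    simp only [pvBadF, List.contains_eq_mem, decide_eq_true_eq, List.mem_cons, List.not_mem_nil,
      or_false, List.cons.injEq, and_true] at hbf
    rw [← Option.isSome_iff_exists, List.find?_isSome]
    rcases hbf with ⟨hx, hy⟩ | ⟨hx, hy⟩ | ⟨hx, hy⟩ | ⟨hx, hy⟩ <;> subst hx <;> subst hy
    · exact ⟨"ab", by simp, hab.mpr hmem⟩
    · exact ⟨"cd", by simp, hcd.mpr hmem⟩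
    · exact ⟨"pq", by simp, hpq.mpr hmem⟩
    · exact ⟨"xy", by simp, hxy.mpr hmem⟩

lemma pvVowels_filter (cs : List Char) :
    (cs.foldl (fun acc letter => if letter ∈ (['a','e','i','o','u'] : List Char) then acc ++ [letter] else acc) []).length
      = cs.countP pvIsVowel := by
  have key : ∀ (acc : List Char),
      (cs.foldl (fun acc letter => if letter ∈ (['a','e','i','o','u'] : List Char) then acc ++ [letter] else acc) acc)
        = acc ++ cs.filter pvIsVowel := by
    induction cs with
    | nil => simp
    | cons c rest ih =>
        intro acc
        rw [List.foldl_cons]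
        by_cases hv : c ∈ (['a','e','i','o','u'] : List Char)
        · rw [if_pos hv, ih, List.filter_cons, if_pos (by simp [pvIsVowel, hv])]
          simp
        · rw [if_neg hv, ih, List.filter_cons, if_neg (by simp [pvIsVowel, hv])]
  rw [key, List.nil_append, ← List.countP_eq_length_filter]

-- ===== VERDICT (by name: the statement is the Claim_ definition above) =====
theorem nice_string_check1_spec : Claim_equal_nice_string_check1 := by
  intro s _
  unfold Spec_nice_string_check1 nice_string_check1 nice_string_check1_alt
  dsimp only
  cases h : s.toList with
  | nil =>
      have hfind : (["ab", "cd", "pq", "xy"] : List String).find? (fun bad => PySem.Str.isIn bad s) = none := by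
        rw [List.find?_eq_none]
        intro bad hb
        rw [Bool.not_eq_true, Bool.eq_false_iff, Ne, PySem.Str.isIn_iff_infix, h]
        fin_cases hb <;> simp
      simp only [hfind, List.foldl_nil]
      simp [pvDupLoopA]
  | cons c rest =>
      have hfold : (c :: rest).foldl pvStepB (0, false, false, none)
          = ((if c ∈ (['a','e','i','o','u'] : List Char) then 1 else 0) + rest.countP pvIsVowel,
              pvPairScan pvEqF c rest, pvPairScan pvBadF c rest, pvLastCh c rest) := by
        rw [List.foldl_cons]
        show List.foldl pvStepB ((if c ∈ (['a','e','i','o','u'] : List Char) then 0 + 1 else 0), false, false, some c) rest = _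
        rw [pvFoldB_inv]
        by_cases hv : c ∈ (['a','e','i','o','u'] : List Char) <;> simp [hv]
      rw [hfold]
      have hbad := pvBad_eq s c rest h
      cases hfind : (["ab", "cd", "pq", "xy"] : List String).find? (fun bad => PySem.Str.isIn bad s) with
      | some bad =>
          rw [hfind] at hbad
          simp only [Option.isSome_some] at hbad
          simp [← hbad]
      | none =>
          rw [hfind] at hbad
          simp only [Option.isSome_none] at hbad
          simp only [← hbad, Bool.false_eq_true, if_false]
          rw [pvDupLoopA_eq_adjScan (c :: rest) (c :: rest).length 0 (by omega)]
          simp only [List.drop_zero, pvAdjScan_cons, pvVowels_filter, List.countP_cons]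
          by_cases hv : c ∈ (['a','e','i','o','u'] : List Char) <;>
            simp [pvIsVowel, hv, Nat.add_comm]
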